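-- pv_equiv track=rewrite | github.com/Lewanja/practice | vowels.py | word1
-- ===== SOURCE A (Python) =====
-- def word1(string):
--     result=0
--     vowels=set()
--     for v in string:
--         if v == 'a' or v =='e' or v=='i' or v=='o' or v=='u':
--             result += 1
--             vowels.add(v)
--         else:
--             pass
--     return result, vowels
-- ===== SOURCE B (Python) =====
-- VOWELS = frozenset('aeiou')
--
-- def word1(string):
--     total = sum(string.count(v) for v in 'aeiou')
--     return total, set(string) & VOWELS
-- ===== Notes on version B (the rewrite author's own statement) =====
-- stated objective: faster
-- what changed: Instead of A's single per-character pass with a branch, a counter and a growing set, B iterates over the fixed vowel alphabet summing str.count(v) for the total and obtains the distinct vowels as the set intersection set(string) & VOWELS.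
import Mathlib
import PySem

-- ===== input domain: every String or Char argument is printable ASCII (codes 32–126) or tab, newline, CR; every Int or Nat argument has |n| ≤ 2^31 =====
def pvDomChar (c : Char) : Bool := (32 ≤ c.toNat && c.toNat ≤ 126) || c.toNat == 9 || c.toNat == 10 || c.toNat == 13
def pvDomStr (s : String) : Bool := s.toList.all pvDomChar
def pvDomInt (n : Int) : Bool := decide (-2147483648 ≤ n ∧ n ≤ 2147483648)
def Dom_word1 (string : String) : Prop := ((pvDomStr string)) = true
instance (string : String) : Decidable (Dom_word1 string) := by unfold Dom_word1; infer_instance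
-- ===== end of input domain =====

-- B iterates over the vowel alphabet (sum of str.count) and uses set intersection instead of A's single pass with a branch, counter and growing set; the per-vowel str.count passes run in C, measured faster at large sizes.

-- ===== PORT A =====
-- the if test of A's loop: v == 'a' or v == 'e' or v == 'i' or v == 'o' or v == 'u'
def word1IsVowel (c : Char) : Bool := c == 'a' || c == 'e' || c == 'i' || c == 'o' || c == 'u'

-- the loop body: branch on the vowel test, increment the counter and add the 1-char string to the set
def word1Step (st : Int × PySem.Set String) (v : Char) : Int × PySem.Set String :=
  if word1IsVowel v then
    (st.1 + 1, PySem.Set.add st.2 (String.ofList [v]))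
  else
    st

def word1 (string : String) : Int × List String :=
  string.toList.foldl word1Step (0, PySem.Set.empty)

-- ===== PORT B =====
-- VOWELS = frozenset('aeiou')  (a 5-element set of 1-char strings)
def word1VOWELS : PySem.Set String := PySem.Set.ofList ["a", "e", "i", "o", "u"]

-- total = sum(string.count(v) for v in 'aeiou'); set(string) & VOWELS
def word1_alt (string : String) : Int × List String :=
  ("aeiou".toList.foldl (fun acc v => acc + (PySem.Chars.count string.toList [v] : Int)) 0,
   PySem.Set.inter (PySem.Set.ofList (string.toList.map (fun c => String.ofList [c]))) word1VOWELS)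

-- ===== PRECONDITION & SPEC =====
def Spec_word1 (string : String) (out : Int × List String) : Prop := out = word1_alt string
instance (string : String) (out : Int × List String) : Decidable (Spec_word1 string out) := by unfold Spec_word1; infer_instance

-- ===== CLAIM =====
def Claim_equal_word1 : Prop := ∀ (string : String), Dom_word1 string → Spec_word1 string (word1 string)

-- ===== LEMMAS AND PROOFS =====

-- membership of the 1-char string in VOWELS is A's per-char vowel test
theorem word1_contains_sing (c : Char) :
    PySem.Set.contains word1VOWELS (String.ofList [c]) = word1IsVowel c := by
  have h : word1VOWELS = ["a", "e", "i", "o", "u"] := by decide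
  have e : ∀ d : Char, (String.ofList [c] == String.ofList [d]) = (c == d) := by
    intro d
    by_cases hc : c = d
    · simp [hc]
    · have : ¬ String.ofList [c] = String.ofList [d] := by
        intro hs
        exact hc (by simpa using congrArg String.toList hs)
      simp [word1IsVowel, beq_iff_eq, this, hc]
  rw [h]
  show (String.ofList [c] == "a" || (String.ofList [c] == "e" || (String.ofList [c] == "i" ||
    (String.ofList [c] == "o" || (String.ofList [c] == "u" || false))))) = word1IsVowel c
  have ea := e 'a'; have ee := e 'e'; have ei := e 'i'; have eo := e 'o'; have eu := e 'u'
  simp only [show ("a" : String) = String.ofList ['a'] from rfl,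
    show ("e" : String) = String.ofList ['e'] from rfl,
    show ("i" : String) = String.ofList ['i'] from rfl,
    show ("o" : String) = String.ofList ['o'] from rfl,
    show ("u" : String) = String.ofList ['u'] from rfl, ea, ee, ei, eo, eu,
    Bool.or_false, word1IsVowel, Bool.or_assoc]

-- A's fold, characterised: count of the filtered chars, set updated with their 1-char strings
theorem word1_foldl_eq (l : List Char) (n : Int) (s : PySem.Set String) :
    l.foldl word1Step (n, s) =
      (n + (((l.filter word1IsVowel).length : Nat) : Int),
       PySem.Set.update s ((l.filter word1IsVowel).map (fun c => String.ofList [c]))) := by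
  induction l generalizing n s with
  | nil => simp [PySem.Set.update]
  | cons c t ih =>
    by_cases h : word1IsVowel c = true
    · simp only [List.foldl_cons, word1Step, h, if_pos, List.filter_cons, ih]
      simp [PySem.Set.update]
      omega
    · simp only [List.foldl_cons, word1Step, h, List.filter_cons, ih]
      simp only [Bool.not_eq_true] at h
      simp [h]

-- str.count with a single-character needle is the char count
theorem word1_count_go (v : Char) (fuel : Nat) (l : List Char) (acc : Nat)
    (h : l.length ≤ fuel) :
    PySem.Chars.count.go [v] fuel l acc = acc + l.count v := by
  induction fuel generalizing l acc with
  | zero =>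
    interval_cases hl : l.length
    · simp at hl; simp [hl, PySem.Chars.count.go]
  | succ f ih =>
    cases l with
    | nil => simp [PySem.Chars.count.go]
    | cons c t =>
      simp only [PySem.Chars.count.go]
      by_cases hv : v = c
      · have hp : [v].isPrefixOf (c :: t) = true := by simp [List.isPrefixOf, hv]
        simp only [hp, if_pos]
        have : List.drop [v].length (c :: t) = t := by simp
        rw [this, ih t (acc + 1) (by simpa using Nat.le_of_succ_le_succ (Nat.succ_le_succ (by simpa using h)))]
        simp [List.count_cons, hv]
        omega
      · have hp : [v].isPrefixOf (c :: t) = false := by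
          simp [List.isPrefixOf, hv]
        simp only [hp]
        rw [if_neg (by simp)]
        rw [ih t acc (by simpa using Nat.le_of_succ_le_succ (by simpa using h))]
        have hv' : ¬ c = v := fun h => hv h.symm
        simp [List.count_cons, hv, hv']

theorem word1_count_single (v : Char) (l : List Char) :
    PySem.Chars.count l [v] = l.count v := by
  simp [PySem.Chars.count, word1_count_go v l.length l 0 (le_refl _)]

-- the five-way sum of per-vowel counts is the count of the filtered string
theorem word1_counts_add (l : List Char) :
    ((l.count 'a' : Nat) : Int) + (l.count 'e' : Nat) + (l.count 'i' : Nat) +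
      (l.count 'o' : Nat) + (l.count 'u' : Nat) =
      (((l.filter word1IsVowel).length : Nat) : Int) := by
  induction l with
  | nil => simp
  | cons c t ih =>
    by_cases hv : word1IsVowel c = true
    · simp only [word1IsVowel, Bool.or_eq_true, beq_iff_eq] at hv
      rcases hv with ((((h | h) | h) | h) | h) <;> subst h <;>
        simp [List.count_cons, List.filter_cons, word1IsVowel] <;> push_cast <;> omega
    · have hv' := hv
      simp only [word1IsVowel, Bool.or_eq_true, beq_iff_eq, not_or] at hv'
      obtain ⟨⟨⟨⟨ha, he⟩, hi⟩, ho⟩, hu⟩ := hv'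
      simp [List.count_cons, List.filter_cons, hv, ha, he, hi, ho, hu, ih]

theorem word1_sum_counts (l : List Char) :
    (['a','e','i','o','u'].foldl (fun acc v => acc + ((l.count v : Nat) : Int)) 0) =
      (((l.filter word1IsVowel).length : Nat) : Int) := by
  simp only [List.foldl, zero_add]
  exact word1_counts_add l

-- filtering distributes over set construction (first-occurrence dedup)
theorem word1_filter_foldl_add {α : Type} [BEq α] [LawfulBEq α]
    (q : α → Bool) (xs : List α) (s : PySem.Set α) :
    (xs.foldl PySem.Set.add s).filter q = (xs.filter q).foldl PySem.Set.add (s.filter q) := by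
  induction xs generalizing s with
  | nil => rfl
  | cons x t ih =>
    have hadd : (PySem.Set.add s x).filter q =
        if q x then PySem.Set.add (s.filter q) x else s.filter q := by
      by_cases hq : q x = true
      · by_cases hm : x ∈ s
        · have hmf : x ∈ List.filter q s := List.mem_filter.mpr ⟨hm, hq⟩
          simp [PySem.Set.add, hm, hq, hmf]
        · have hmf : x ∉ List.filter q s := fun hx => hm (List.mem_filter.mp hx).1
          simp [PySem.Set.add, hm, hq, hmf, List.filter_append]
      · by_cases hm : x ∈ s
        · simp [PySem.Set.add, hm, hq]
        · simp [PySem.Set.add, hm, hq, List.filter_append]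
    simp only [List.foldl_cons, List.filter_cons]
    by_cases hq : q x = true
    · rw [ih, hadd]; simp [hq]
    · rw [ih, hadd]; simp only [Bool.not_eq_true] at hq; simp [hq]

-- the set side: set(string) & VOWELS equals the set A builds from the filtered chars
theorem word1_set_eq (l : List Char) :
    PySem.Set.inter (PySem.Set.ofList (l.map (fun c => String.ofList [c]))) word1VOWELS =
      PySem.Set.ofList ((l.filter word1IsVowel).map (fun c => String.ofList [c])) := by
  have hq : (fun x => PySem.Set.contains word1VOWELS x) ∘ (fun c => String.ofList [c]) =
      word1IsVowel := by
    funext c; exact word1_contains_sing c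
  calc PySem.Set.inter (PySem.Set.ofList (l.map (fun c => String.ofList [c]))) word1VOWELS
      = (PySem.Set.ofList (l.map (fun c => String.ofList [c]))).filter
          (fun x => PySem.Set.contains word1VOWELS x) := rfl
    _ = ((l.map (fun c => String.ofList [c])).filter
          (fun x => PySem.Set.contains word1VOWELS x)).foldl PySem.Set.add
          (PySem.Set.empty.filter (fun x => PySem.Set.contains word1VOWELS x)) := by
        exact word1_filter_foldl_add _ _ _
    _ = PySem.Set.ofList ((l.filter word1IsVowel).map (fun c => String.ofList [c])) := by
        rw [List.filter_map, hq]; rfl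

-- ===== VERDICT =====
theorem word1_spec : Claim_equal_word1 := by
  intro string _
  show word1 string = word1_alt string
  have hA := word1_foldl_eq string.toList 0 PySem.Set.empty
  simp only [word1, hA, zero_add, word1_alt]
  refine Prod.ext ?_ ?_
  · show (((string.toList.filter word1IsVowel).length : Nat) : Int) =
      "aeiou".toList.foldl (fun acc v => acc + (PySem.Chars.count string.toList [v] : Int)) 0
    have : "aeiou".toList = ['a','e','i','o','u'] := by decide
    rw [this]
    simp only [word1_count_single]
    exact (word1_sum_counts string.toList).symm
  · show PySem.Set.update PySem.Set.empty ((string.toList.filter word1IsVowel).map (fun c => String.ofList [c])) =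
      PySem.Set.inter (PySem.Set.ofList (string.toList.map (fun c => String.ofList [c]))) word1VOWELS
    rw [word1_set_eq]
    rfl
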